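-- pv_equiv track=rewrite | github.com/studio3104/leetcodeAnswers | python/p0937_Reorder_Data_in_Log_Files.py | sort_lets
-- ===== SOURCE A (Python) =====
-- from typing import List
--
-- def sort_lets(lets: List[str]) -> List[str]:
--     length = len(lets)
--
--     if length < 2:
--         return lets
--
--     pivot_index = int(length / 2)
--     pivot = lets[pivot_index]
--     pivot_letter = ' '.join(pivot.split()[1:])
--     less: List[str] = []
--     greater: List[str] = []
--
--     for i, l in enumerate(lets):
--         if i == pivot_index:
--             continue
--
--         letter = ' '.join(l.split()[1:])
--
--         if pivot_letter == letter:
--             _append = greater.append if l > pivot else less.append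
--         else:
--             _append = greater.append if letter > pivot_letter else less.append
--
--         _append(l)
--
--     return sort_lets(less) + [pivot] + sort_lets(greater)
-- ===== SOURCE B (Python) =====
-- from typing import List
--
-- def sort_lets(lets: List[str]) -> List[str]:
--     return sorted(lets, key=lambda l: (' '.join(l.split()[1:]), l))
-- ===== Notes on version B (the rewrite author's own statement) =====
-- stated objective: faster
-- what changed: Replaced the handwritten recursive quicksort (middle pivot, partition into less/greater, recurse) by a single builtin sorted() call keyed on the tuple (letter-content, full log).
import Mathlib
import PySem

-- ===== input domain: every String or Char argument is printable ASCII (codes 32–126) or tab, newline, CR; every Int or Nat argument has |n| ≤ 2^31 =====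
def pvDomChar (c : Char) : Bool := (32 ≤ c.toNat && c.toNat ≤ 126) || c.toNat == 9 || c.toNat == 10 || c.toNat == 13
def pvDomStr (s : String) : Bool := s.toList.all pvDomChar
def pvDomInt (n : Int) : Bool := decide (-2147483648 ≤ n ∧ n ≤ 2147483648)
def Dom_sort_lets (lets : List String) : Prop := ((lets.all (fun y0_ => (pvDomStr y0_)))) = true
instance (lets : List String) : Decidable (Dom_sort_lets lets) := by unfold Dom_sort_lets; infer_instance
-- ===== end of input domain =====

-- B replaces A's handwritten recursive quicksort with one `sorted` call on the tuple key (letter-content, log) — idiomatic.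

-- ===== PORT A =====
-- ' '.join(l.split()[1:])
def pvLetter (l : String) : String :=
  PySem.Str.join " " (PySem.List.slice (PySem.Str.split₀ l) (some 1) none)

-- the body of A's `for i, l in enumerate(lets)` loop, one step
def pvStepA (pidx : Int) (pivot pletter : String) (lg : List String × List String)
    (p : Int × String) : List String × List String :=
  if p.1 == pidx then lg
  else
    let letter := pvLetter p.2
    if pletter == letter then
      if pivot < p.2 then (lg.1, lg.2 ++ [p.2]) else (lg.1 ++ [p.2], lg.2)
    else
      if pletter < letter then (lg.1, lg.2 ++ [p.2]) else (lg.1 ++ [p.2], lg.2)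

-- "goes to `greater`" test, used only to characterise the loop for termination/proofs
def pvGT (pivot l : String) : Bool :=
  if pvLetter pivot == pvLetter l then decide (pivot < l) else decide (pvLetter pivot < pvLetter l)

theorem pvStepA_foldl (pidx : Int) (pivot : String) (xs : List (Int × String))
    (acc : List String × List String) (hx : ∀ q ∈ xs, q.1 ≠ pidx) :
    xs.foldl (pvStepA pidx pivot (pvLetter pivot)) acc =
      (acc.1 ++ (xs.map Prod.snd).filter (fun l => !pvGT pivot l),
       acc.2 ++ (xs.map Prod.snd).filter (fun l => pvGT pivot l)) := by
  induction xs generalizing acc with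
  | nil => simp
  | cons q qs ih =>
    have hq : q.1 ≠ pidx := hx q (List.mem_cons_self)
    have hqs : ∀ r ∈ qs, r.1 ≠ pidx := fun r hr => hx r (List.mem_cons_of_mem _ hr)
    simp only [List.foldl_cons, List.map_cons, List.filter_cons]
    rw [ih _ hqs]
    unfold pvStepA pvGT
    simp only [hq, if_false, beq_iff_eq]
    by_cases h1 : pvLetter pivot = pvLetter q.2
    · by_cases h2 : pivot < q.2 <;> simp [h1, h2]
    · by_cases h2 : pvLetter pivot < pvLetter q.2 <;> simp [h1, h2]

theorem pvStepA_foldl_enum (lets : List String) (p : Nat) (hp : p < lets.length)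
    (pivot : String) (_hpv : pivot = lets[p]) :
    (PySem.List.enumerate lets 0).foldl (pvStepA (p : Int) pivot (pvLetter pivot)) ([], []) =
      ((lets.eraseIdx p).filter (fun l => !pvGT pivot l),
       (lets.eraseIdx p).filter (fun l => pvGT pivot l)) := by
  have hsplit : lets = lets.take p ++ lets[p] :: lets.drop (p + 1) := by
    conv_lhs => rw [← List.take_append_drop p lets]
    rw [List.getElem_cons_drop]
  have hlen : (lets.take p).length = p := by simp [hp.le]
  conv_lhs => rw [hsplit]
  rw [PySem.List.enumerate_append, PySem.List.enumerate_cons, List.foldl_append, List.foldl_cons]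
  have h1 : ∀ q ∈ PySem.List.enumerate (lets.take p) 0, q.1 ≠ (p : Int) := by
    intro q hq
    rw [PySem.List.mem_enumerate_iff] at hq
    obtain ⟨k, hk, rfl⟩ := hq
    rw [hlen] at hk
    simp; omega
  have h2 : ∀ q ∈ PySem.List.enumerate (lets.drop (p + 1)) (0 + (lets.take p).length + 1),
      q.1 ≠ (p : Int) := by
    intro q hq
    rw [PySem.List.mem_enumerate_iff] at hq
    obtain ⟨k, hk, rfl⟩ := hq
    simp [hlen]; omega
  rw [pvStepA_foldl _ _ _ _ h1]
  have hmid : pvStepA (p : Int) pivot (pvLetter pivot)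
      (([] : List String) ++ (List.map Prod.snd (PySem.List.enumerate (lets.take p) 0)).filter (fun l => !pvGT pivot l),
       ([] : List String) ++ (List.map Prod.snd (PySem.List.enumerate (lets.take p) 0)).filter (fun l => pvGT pivot l))
      (0 + (lets.take p).length, lets[p]) =
      (([] : List String) ++ (List.map Prod.snd (PySem.List.enumerate (lets.take p) 0)).filter (fun l => !pvGT pivot l),
       ([] : List String) ++ (List.map Prod.snd (PySem.List.enumerate (lets.take p) 0)).filter (fun l => pvGT pivot l)) := by
    unfold pvStepA
    simp [hlen]
  rw [hmid, pvStepA_foldl _ _ _ _ h2]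
  rw [List.eraseIdx_eq_take_drop_succ, List.filter_append, List.filter_append]
  simp [PySem.List.map_snd_enumerate]

theorem pv_rec_lt (lets : List String) (p : Nat) (hp : p < lets.length)
    (_h2 : ¬ lets.length < 2) (f : String → Bool) :
    ((lets.eraseIdx p).filter f).length < lets.length := by
  have := List.length_filter_le f (lets.eraseIdx p)
  have := List.length_eraseIdx_of_lt hp
  omega

def sort_lets (lets : List String) : List String :=
  -- `length = len(lets)` / `if length < 2: return lets`
  if h : lets.length < 2 then lets
  else
    -- pivot_index = int(length / 2); length ≥ 0, so this is length / 2
    let pivot_index : Nat := lets.length / 2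
    -- pivot = lets[pivot_index]; in range since 2 ≤ length
    let pivot := PySem.List.pyGetD lets (pivot_index : Int) ""
    let pivot_letter := pvLetter pivot
    -- the for-loop building (less, greater)
    let lg := (PySem.List.enumerate lets 0).foldl
      (pvStepA (pivot_index : Int) pivot pivot_letter) ([], [])
    sort_lets lg.1 ++ [pivot] ++ sort_lets lg.2
termination_by lets.length
decreasing_by
  all_goals
    have hp : lets.length / 2 < lets.length := by omega
    have hpv : PySem.List.pyGetD lets ((lets.length / 2 : Nat) : Int) "" = lets[lets.length / 2] := by
      rw [PySem.List.pyGetD_natCast, List.getD_eq_getElem _ _ hp]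
  · rw [pvStepA_foldl_enum lets (lets.length / 2) hp _ hpv]
    exact pv_rec_lt lets _ hp h _
  · rw [pvStepA_foldl_enum lets (lets.length / 2) hp _ hpv]
    exact pv_rec_lt lets _ hp h _

-- ===== PORT B =====
def sort_lets_alt (lets : List String) : List String :=
  PySem.List.sorted2 lets (fun l => pvLetter l) (fun l => l)

-- ===== PRECONDITION & SPEC =====
def Spec_sort_lets (lets : List String) (out : List String) : Prop := out = sort_lets_alt lets
instance (lets : List String) (out : List String) : Decidable (Spec_sort_lets lets out) := by unfold Spec_sort_lets; infer_instance

-- ===== CLAIM (what is proved, stated in full; the proofs are below) =====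
def Claim_equal_sort_lets : Prop := ∀ (lets : List String), Dom_sort_lets lets → Spec_sort_lets lets (sort_lets lets)

-- ===== LEMMAS AND PROOFS =====

def pvK (l : String) : Lex (String × String) := toLex (pvLetter l, l)

def pvR (a b : String) : Prop := pvK a ≤ pvK b

theorem pvK_inj {a b : String} (h : pvK a = pvK b) : a = b := by
  have := congrArg (fun x => (ofLex x).2) h
  simpa [pvK] using this

theorem pvR_antisymm {a b : String} (h1 : pvR a b) (h2 : pvR b a) : a = b :=
  pvK_inj (le_antisymm h1 h2)

theorem pvGT_iff (pivot l : String) : pvGT pivot l = true ↔ pvK pivot < pvK l := by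
  unfold pvGT pvK
  rw [Prod.Lex.lt_iff]
  by_cases h : pvLetter pivot = pvLetter l <;> simp [h]

theorem pvGT_false_iff (pivot l : String) : pvGT pivot l = false ↔ pvR l pivot := by
  rw [← Bool.not_eq_true, pvGT_iff, not_lt]; rfl

theorem pairwise_append3 {l1 l2 : List String} {m : String}
    (h1 : l1.Pairwise pvR) (h2 : l2.Pairwise pvR)
    (hm1 : ∀ a ∈ l1, pvR a m) (hm2 : ∀ b ∈ l2, pvR m b) :
    (l1 ++ [m] ++ l2).Pairwise pvR := by
  rw [List.pairwise_append, List.pairwise_append]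
  refine ⟨⟨h1, List.pairwise_singleton _ _, by simpa using hm1⟩, h2, ?_⟩
  intro a ha b hb
  rcases List.mem_append.1 ha with ha | ha
  · exact le_trans (hm1 a ha) (hm2 b hb)
  · simp at ha; subst ha; exact hm2 b hb

theorem sort_lets_perm_pairwise (lets : List String) :
    (sort_lets lets).Perm lets ∧ (sort_lets lets).Pairwise pvR := by
  induction lets using sort_lets.induct with
  | case1 lets h =>
    rw [sort_lets, dif_pos h]
    refine ⟨List.Perm.refl _, ?_⟩
    match lets, h with
    | [], _ => exact List.Pairwise.nil
    | [a], _ => exact List.pairwise_singleton _ _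
  | case2 lets h pivot_index pivot pivot_letter lg ih1 ih2 =>
    have hp : lets.length / 2 < lets.length := by omega
    have hpv : pivot = lets[lets.length / 2] := by
      show PySem.List.pyGetD lets ((lets.length / 2 : Nat) : Int) "" = lets[lets.length / 2]
      rw [PySem.List.pyGetD_natCast, List.getD_eq_getElem _ _ hp]
    have hlg : lg = ((lets.eraseIdx (lets.length / 2)).filter (fun l => !pvGT pivot l),
        (lets.eraseIdx (lets.length / 2)).filter (fun l => pvGT pivot l)) := by
      show ((PySem.List.enumerate lets 0).foldl
        (pvStepA ((lets.length / 2 : Nat) : Int) pivot (pvLetter pivot)) ([], [])) = _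
      exact pvStepA_foldl_enum lets (lets.length / 2) hp _ hpv
    obtain ⟨hperm1, hpw1⟩ := ih1
    obtain ⟨hperm2, hpw2⟩ := ih2
    rw [sort_lets, dif_neg h]
    show (sort_lets lg.1 ++ [pivot] ++ sort_lets lg.2).Perm lets ∧
      (sort_lets lg.1 ++ [pivot] ++ sort_lets lg.2).Pairwise pvR
    constructor
    · -- permutation
      have hmem : ((lets.eraseIdx (lets.length / 2)).filter (fun l => !pvGT pivot l) ++
          (lets.eraseIdx (lets.length / 2)).filter (fun l => pvGT pivot l)).Perm
          (lets.eraseIdx (lets.length / 2)) := by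
        have := List.filter_append_perm (fun l => !pvGT pivot l) (lets.eraseIdx (lets.length / 2))
        simpa using this
      have hsplit : lets = lets.take (lets.length / 2) ++
          lets[lets.length / 2] :: lets.drop (lets.length / 2 + 1) := by
        conv_lhs => rw [← List.take_append_drop (lets.length / 2) lets]
        rw [List.getElem_cons_drop]
      refine ((hperm1.append (List.Perm.refl [pivot])).append hperm2).trans ?_
      have e1 : lg.1 ++ [pivot] ++ lg.2 = lg.1 ++ pivot :: lg.2 := by simp
      rw [e1, hlg]
      refine List.perm_middle.trans ?_
      refine (List.Perm.cons pivot hmem).trans ?_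
      rw [List.eraseIdx_eq_take_drop_succ]
      conv_rhs => rw [hsplit, ← hpv]
      exact List.perm_middle.symm
    · -- pairwise
      refine pairwise_append3 hpw1 hpw2 ?_ ?_
      · intro a ha
        have ha' : a ∈ lg.1 := hperm1.mem_iff.1 ha
        rw [hlg] at ha'
        have := List.of_mem_filter ha'
        exact (pvGT_false_iff pivot a).1 (by simpa using this)
      · intro b hb
        have hb' : b ∈ lg.2 := hperm2.mem_iff.1 hb
        rw [hlg] at hb'
        have := List.of_mem_filter hb'
        exact le_of_lt ((pvGT_iff pivot b).1 this)

theorem pv_insertBy_pairwise (x : String) (l : List String) (h : l.Pairwise pvR) :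
    (PySem.List.insertBy (fun a b => decide (pvK a < pvK b)) x l).Pairwise pvR := by
  induction l with
  | nil => simp [PySem.List.insertBy]
  | cons y ys ih =>
    rw [PySem.List.insertBy]
    rcases List.pairwise_cons.1 h with ⟨hy, hys⟩
    by_cases hxy : pvK x < pvK y
    · simp only [hxy, decide_true, if_true]
      refine List.pairwise_cons.2 ⟨?_, h⟩
      intro b hb
      rcases List.mem_cons.1 hb with rfl | hb
      · exact le_of_lt hxy
      · exact le_trans (le_of_lt hxy) (hy b hb)
    · simp only [hxy, decide_false, Bool.false_eq_true, if_false]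
      refine List.pairwise_cons.2 ⟨?_, ih hys⟩
      intro b hb
      rcases (PySem.List.mem_insertBy _ _ _ _).1 hb with rfl | hb
      · exact not_lt.1 hxy
      · exact hy b hb

theorem pv_lt_eq (a b : String) :
    (decide (pvLetter a < pvLetter b) || (!decide (pvLetter b < pvLetter a) && decide (a < b))) =
      decide (pvK a < pvK b) := by
  rcases lt_trichotomy (pvLetter a) (pvLetter b) with h | h | h
  · simp [pvK, Prod.Lex.lt_iff, h]
  · simp [pvK, Prod.Lex.lt_iff, h]
  · simp [pvK, Prod.Lex.lt_iff, h, not_lt_of_gt h, ne_of_gt h]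

theorem sort_lets_alt_eq_foldl (lets : List String) :
    sort_lets_alt lets =
      lets.foldl (fun acc x => PySem.List.insertBy (fun a b => decide (pvK a < pvK b)) x acc) [] := by
  unfold sort_lets_alt PySem.List.sorted2
  simp only [if_neg (by simp : ¬ (false = true))]
  congr 1
  funext acc x
  congr 1
  funext a b
  exact pv_lt_eq a b

theorem sort_lets_alt_pairwise (lets : List String) : (sort_lets_alt lets).Pairwise pvR := by
  rw [sort_lets_alt_eq_foldl]
  have key : ∀ (xs : List String) (acc : List String), acc.Pairwise pvR →
      (xs.foldl (fun acc x => PySem.List.insertBy (fun a b => decide (pvK a < pvK b)) x acc) acc).Pairwise pvR := by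
    intro xs
    induction xs with
    | nil => intro acc h; simpa using h
    | cons x xs ih =>
      intro acc h
      exact ih _ (pv_insertBy_pairwise x acc h)
  exact key lets [] List.Pairwise.nil

-- ===== VERDICT (by name: the statement is the Claim_ definition above) =====
theorem sort_lets_spec : Claim_equal_sort_lets := by
  unfold Claim_equal_sort_lets Spec_sort_lets
  intro lets _
  obtain ⟨hperm, hpw⟩ := sort_lets_perm_pairwise lets
  have hperm2 : (sort_lets lets).Perm (sort_lets_alt lets) :=
    hperm.trans (PySem.List.sorted2_perm lets _ _ false).symm
  exact hperm2.eq_of_pairwise (fun a b _ _ h1 h2 => pvR_antisymm h1 h2) hpw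
    (sort_lets_alt_pairwise lets)
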